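-- pv_equiv track=rewrite | github.com/ubuntu-dev/T-ENTacle | text_analysis/report_pattern_analysis.py | align_separate
-- ===== SOURCE A (Python) =====
-- def align_separate(arr, gt):
--     rec_ind=[]
--     last_found=-1
--     i=0
--     for j in range(len(arr)):
--         if arr[j] not in gt:
--             continue
--         notfound = True
--         while notfound:
--             if i==len(gt):
--                 i=0
--                 rec_ind.append(last_found)
--             if arr[j]==gt[i]:
--                 last_found=j
--                 notfound=False
--             i+=1
--
--     return rec_ind
-- ===== SOURCE B (Python) =====
-- def align_separate(arr, gt):
--     # Index gt once (value -> ascending list of positions), then find each next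
--     # cyclic occurrence by binary search instead of scanning gt element by element.
--     pos = {}
--     for k, v in enumerate(gt):
--         pos.setdefault(v, []).append(k)
--     rec_ind = []
--     last_found = -1
--     i = 0
--     for j, v in enumerate(arr):
--         ps = pos.get(v)
--         if ps is None:
--             continue
--         lo, hi = 0, len(ps)
--         while lo < hi:  # leftmost position in ps that is >= i
--             mid = (lo + hi) // 2
--             if ps[mid] < i:
--                 lo = mid + 1
--             else:
--                 hi = mid
--         if lo == len(ps):
--             rec_ind.append(last_found)
--             p = ps[0]
--         else:
--             p = ps[lo]
--         last_found = j
--         i = p + 1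
--     return rec_ind
-- ===== Notes on version B (the rewrite author's own statement) =====
-- stated objective: faster
-- what changed: Replaces the cyclic element-by-element scan of gt for every matched arr element with a dict from value to its sorted positions built once, plus a binary search for the next cyclic occurrence.
import Mathlib
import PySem

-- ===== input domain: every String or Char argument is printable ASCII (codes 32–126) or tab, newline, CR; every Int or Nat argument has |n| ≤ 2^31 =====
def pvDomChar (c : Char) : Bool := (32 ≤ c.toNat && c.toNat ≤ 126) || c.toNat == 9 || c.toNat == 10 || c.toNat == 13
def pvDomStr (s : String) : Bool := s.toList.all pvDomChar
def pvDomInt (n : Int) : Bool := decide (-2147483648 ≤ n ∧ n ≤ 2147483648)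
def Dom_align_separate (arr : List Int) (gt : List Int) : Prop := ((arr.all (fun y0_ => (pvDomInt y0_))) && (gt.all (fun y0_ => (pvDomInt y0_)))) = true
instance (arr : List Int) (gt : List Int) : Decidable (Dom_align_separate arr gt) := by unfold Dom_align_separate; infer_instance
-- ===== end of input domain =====

-- B replaces A's cyclic linear rescans of gt by a positions dict + binary search (objective: faster).

-- ===== PORT A =====
-- the inner `while notfound` loop; state (last_found, i, rec_ind); fueled (the
-- Python loop terminates iff v ∈ gt, and it is only entered then; on fuel
-- exhaustion — unreachable for v ∈ gt — the current state is returned).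
-- gt[i] is ported as pyGetD: on every reachable state 0 ≤ i < gt.length.
def alignInner (gt : List Int) (v : Int) (j : Int) :
    Nat → Int → Int → List Int → (Int × Int × List Int)
  | 0, i, last_found, rec_ind => (last_found, i, rec_ind)
  | fuel+1, i, last_found, rec_ind =>
    let i' := if i = (gt.length : Int) then 0 else i
    let rec' := if i = (gt.length : Int) then rec_ind ++ [last_found] else rec_ind
    if PySem.List.pyGetD gt i' 0 = v then (j, i' + 1, rec')
    else alignInner gt v j fuel (i' + 1) last_found rec'

def align_separate (arr : List Int) (gt : List Int) : List Int :=
  let st := (PySem.List.enumerate arr).foldl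
    (fun (st : Int × Int × List Int) jv =>
      if jv.2 ∈ gt then
        alignInner gt jv.2 jv.1 (2 * gt.length + 2) st.2.1 st.1 st.2.2
      else st)
    (-1, 0, ([] : List Int))
  st.2.2

-- ===== PORT B =====
-- Source B's hand-written `while lo < hi` binary search: leftmost index with ps[idx] ≥ x.
-- `(lo + hi) // 2` is Nat division here (lo, hi ≥ 0), which agrees with Python's //.
def bisectLoop (ps : List Int) (x : Int) (lo hi : Nat) : Nat :=
  if _h : lo < hi then
    let mid := (lo + hi) / 2
    if PySem.List.pyGetD ps (mid : Int) 0 < x then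
      bisectLoop ps x (mid + 1) hi
    else
      bisectLoop ps x lo mid
  else lo
termination_by hi - lo
decreasing_by all_goals omega

-- pos.setdefault(v, []).append(k)
def buildPos (gt : List Int) : PySem.Dict Int (List Int) :=
  (PySem.List.enumerate gt).foldl
    (fun d kv => d.insert kv.2 (d.getD kv.2 [] ++ [kv.1])) PySem.Dict.empty

def align_separate_alt (arr : List Int) (gt : List Int) : List Int :=
  let pos := buildPos gt
  let st := (PySem.List.enumerate arr).foldl
    (fun (st : Int × Int × List Int) jv =>
      match pos.get? jv.2 with
      | none => st
      | some ps =>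
        let lo := bisectLoop ps st.2.1 0 ps.length
        if lo = ps.length then
          (jv.1, PySem.List.pyGetD ps 0 0 + 1, st.2.2 ++ [st.1])
        else
          (jv.1, PySem.List.pyGetD ps (lo : Int) 0 + 1, st.2.2))
    (-1, 0, ([] : List Int))
  st.2.2

-- ===== PRECONDITION & SPEC =====
def Spec_align_separate (arr : List Int) (gt : List Int) (out : List Int) : Prop := out = align_separate_alt arr gt
instance (arr : List Int) (gt : List Int) (out : List Int) : Decidable (Spec_align_separate arr gt out) := by unfold Spec_align_separate; infer_instance

-- ===== CLAIM (what is proved, stated in full; the proofs are below) =====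
def Claim_equal_align_separate : Prop := ∀ (arr : List Int) (gt : List Int), Dom_align_separate arr gt → Spec_align_separate arr gt (align_separate arr gt)

-- ===== LEMMAS AND PROOFS =====

def occ (gt : List Int) (v : Int) : List Int :=
  (PySem.List.enumerate gt).filterMap (fun kv => if kv.2 = v then some kv.1 else none)

theorem mem_occ {gt : List Int} {v q : Int} :
    q ∈ occ gt v ↔ ∃ (k : Nat) (hk : k < gt.length), q = (k : Int) ∧ gt[k] = v := by
  simp only [occ, List.mem_filterMap]
  constructor
  · rintro ⟨kv, hkv, hf⟩
    rw [PySem.List.mem_enumerate_iff] at hkv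
    obtain ⟨k, hk, rfl⟩ := hkv
    simp only at hf
    split at hf
    · exact ⟨k, hk, by simp_all, by simp_all⟩
    · simp at hf
  · rintro ⟨k, hk, rfl, hv⟩
    exact ⟨((k:Int), gt[k]), by rw [PySem.List.mem_enumerate_iff]; exact ⟨k, hk, by simp⟩, by simp [hv]⟩

theorem occ_pairwise (gt : List Int) (v : Int) : (occ gt v).Pairwise (· < ·) := by
  unfold occ
  have h := PySem.List.pairwise_lt_enumerate (xs := gt) (s := 0)
  refine List.Pairwise.filterMap _ ?_ h
  intro a b hab x hx y hy
  split at hx <;> split at hy <;> simp_all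

theorem occ_nonneg {gt : List Int} {v q : Int} (h : q ∈ occ gt v) : 0 ≤ q := by
  obtain ⟨k, hk, rfl, _⟩ := mem_occ.mp h; positivity

theorem occ_lt {gt : List Int} {v q : Int} (h : q ∈ occ gt v) : q < (gt.length : Int) := by
  obtain ⟨k, hk, rfl, _⟩ := mem_occ.mp h; exact_mod_cast hk

theorem occ_getD {gt : List Int} {v q : Int} (h : q ∈ occ gt v) :
    PySem.List.pyGetD gt q 0 = v := by
  obtain ⟨k, hk, rfl, hv⟩ := mem_occ.mp h
  rw [PySem.List.pyGetD_natCast]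
  simpa [List.getD_eq_getElem?_getD, List.getElem?_eq_getElem hk] using hv

theorem mem_occ_of_getD {gt : List Int} {v i : Int} (h0 : 0 ≤ i) (h1 : i < (gt.length : Int))
    (h : PySem.List.pyGetD gt i 0 = v) : i ∈ occ gt v := by
  refine mem_occ.mpr ⟨i.toNat, by omega, by omega, ?_⟩
  rw [PySem.List.pyGetD_eq_getElem gt 0 h0 h1] at h
  exact h

theorem occ_ne_nil {gt : List Int} {v : Int} (h : v ∈ gt) : occ gt v ≠ [] := by
  obtain ⟨k, hk, hv⟩ := List.mem_iff_getElem.mp h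
  intro hnil
  have : (k : Int) ∈ occ gt v := mem_occ.mpr ⟨k, hk, rfl, hv⟩
  simp [hnil] at this

theorem occ_nil {gt : List Int} {v : Int} (h : v ∉ gt) : occ gt v = [] := by
  rcases hocc : occ gt v with _ | ⟨q, t⟩
  · rfl
  · exfalso
    have hq : q ∈ occ gt v := by rw [hocc]; exact List.mem_cons_self
    obtain ⟨k, hk, rfl, hv⟩ := mem_occ.mp hq
    exact h (hv ▸ List.getElem_mem hk)

theorem buildAux :
    ∀ (l : List (Int × Int)) (d : PySem.Dict Int (List Int)) (v : Int),
      (l.foldl (fun d kv => d.insert kv.2 (d.getD kv.2 [] ++ [kv.1])) d).get? v =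
        if (d.get? v).isSome ∨ l.filterMap (fun kv => if kv.2 = v then some kv.1 else none) ≠ []
        then some ((d.get? v).getD [] ++ l.filterMap (fun kv => if kv.2 = v then some kv.1 else none))
        else none := by
  intro l
  induction l with
  | nil =>
    intro d v
    simp only [List.foldl_nil, List.filterMap_nil, ne_eq, not_true_eq_false, or_false,
      List.append_nil]
    rcases h : d.get? v with _ | xs <;> simp
  | cons kv t ih =>
    intro d v
    obtain ⟨k, w⟩ := kv
    simp only [List.foldl_cons, List.filterMap_cons]
    rw [ih]
    by_cases hvw : v = w
    · subst hvw
      rw [PySem.Dict.get?_insert_self]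
      simp [PySem.Dict.getD_eq_get?_getD]
    · rw [PySem.Dict.get?_insert_of_ne _ _ hvw]
      have hwv : ¬ (w = v) := fun h => hvw h.symm
      rw [if_neg hwv]

theorem buildPos_get? (gt : List Int) (v : Int) :
    (buildPos gt).get? v = if occ gt v = [] then none else some (occ gt v) := by
  unfold buildPos
  rw [buildAux]
  simp only [PySem.Dict.get?_empty, Option.isSome_none, Bool.false_eq_true, false_or,
    Option.getD_none, List.nil_append]
  rcases h : occ gt v with _ | ⟨q, t⟩
  · simp_all [occ]
    intro x hx
    exact h x v hx rfl
  · simp_all [occ]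

theorem bisect_inv (ps : List Int) (x : Int) (hps : ps.Pairwise (· < ·)) :
    ∀ (d lo hi : Nat), hi - lo ≤ d → lo ≤ hi → hi ≤ ps.length →
      (∀ k, k < lo → ps.getD k 0 < x) → (∀ k, hi ≤ k → k < ps.length → x ≤ ps.getD k 0) →
      lo ≤ bisectLoop ps x lo hi ∧ bisectLoop ps x lo hi ≤ hi ∧
      (∀ k, k < bisectLoop ps x lo hi → ps.getD k 0 < x) ∧
      (∀ k, bisectLoop ps x lo hi ≤ k → k < ps.length → x ≤ ps.getD k 0) := by
  have hmono : ∀ (a b : Nat), a ≤ b → b < ps.length → ps.getD a 0 ≤ ps.getD b 0 := by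
    intro a b hab hb
    rcases Nat.eq_or_lt_of_le hab with rfl | hlt
    · exact le_refl _
    · rw [List.getD_eq_getElem _ _ (by omega), List.getD_eq_getElem _ _ hb]
      exact le_of_lt (List.pairwise_iff_getElem.mp hps a b (by omega) hb hlt)
  intro d
  induction d with
  | zero =>
    intro lo hi h1 h2 h3 hlow hhigh
    have : lo = hi := by omega
    subst this
    rw [bisectLoop, dif_neg (by omega)]
    exact ⟨le_refl _, le_refl _, hlow, hhigh⟩
  | succ d ih =>
    intro lo hi h1 h2 h3 hlow hhigh
    by_cases hlt : lo < hi
    · rw [bisectLoop, dif_pos hlt]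
      simp only []
      have hmidlt : (lo + hi) / 2 < ps.length := by omega
      rw [PySem.List.pyGetD_natCast]
      split_ifs with hcmp
      · have := ih ((lo + hi) / 2 + 1) hi (by omega) (by omega) h3
          (by
            intro k hk
            rcases Nat.lt_or_ge k lo with h | h
            · exact hlow k h
            · exact lt_of_le_of_lt (hmono k ((lo + hi) / 2) (by omega) hmidlt) hcmp)
          hhigh
        exact ⟨by omega, this.2.1.trans (le_refl _), this.2.2.1, this.2.2.2⟩
      · have := ih lo ((lo + hi) / 2) (by omega) (by omega) (by omega) hlow
          (by
            intro k hk hklen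
            exact le_trans (le_of_not_gt hcmp) (hmono ((lo + hi) / 2) k hk hklen))
        exact ⟨this.1, by omega, this.2.2.1, this.2.2.2⟩
    · rw [bisectLoop, dif_neg hlt]
      exact ⟨le_refl _, by omega, hlow, fun k hk hklen => hhigh k (by omega) hklen⟩

theorem inner_found (gt : List Int) (v : Int) (j : Int) :
    ∀ (fuel : Nat) (i p lf : Int) (rec : List Int),
      0 ≤ i → i ≤ p → p ∈ occ gt v → (∀ q ∈ occ gt v, i ≤ q → p ≤ q) →
      (p - i).toNat < fuel →
      alignInner gt v j fuel i lf rec = (j, p + 1, rec) := by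
  intro fuel
  induction fuel with
  | zero => intro i p lf rec _ _ _ _ hf; omega
  | succ f ih =>
    intro i p lf rec h0 hip hp hmin hf
    have hpn : p < (gt.length : Int) := occ_lt hp
    have hin : ¬ (i = (gt.length : Int)) := by omega
    simp only [alignInner, if_neg hin]
    by_cases hv : PySem.List.pyGetD gt i 0 = v
    · have hio : i ∈ occ gt v := mem_occ_of_getD h0 (by omega) hv
      have : p = i := le_antisymm (hmin i hio (le_refl i)) hip
      simp [hv, this]
    · rw [if_neg hv]
      have hne : i ≠ p := fun h => hv (h ▸ occ_getD hp)
      exact ih (i + 1) p lf rec (by omega) (by omega) hp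
        (fun q hq hq1 => hmin q hq (by omega)) (by omega)

theorem inner_scan (gt : List Int) (v : Int) (j : Int) :
    ∀ (c : Nat) (i lf : Int) (rec : List Int) (fuel : Nat),
      0 ≤ i → i + (c : Int) = (gt.length : Int) → (∀ q ∈ occ gt v, q < i) →
      alignInner gt v j (fuel + c) i lf rec = alignInner gt v j fuel (gt.length : Int) lf rec := by
  intro c
  induction c with
  | zero =>
    intro i lf rec fuel _ hi _
    simp only [Nat.cast_zero, add_zero] at hi ⊢
    rw [hi]
  | succ c ih =>
    intro i lf rec fuel h0 hi hq
    have hin : ¬ (i = (gt.length : Int)) := by push_cast at hi; omega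
    show alignInner gt v j ((fuel + c) + 1) i lf rec = _
    simp only [alignInner, if_neg hin]
    have hv : ¬ (PySem.List.pyGetD gt i 0 = v) := by
      intro hv
      have := hq i (mem_occ_of_getD h0 (by push_cast at hi; omega) hv)
      omega
    rw [if_neg hv]
    exact ih (i + 1) lf rec fuel (by omega) (by push_cast at hi ⊢; omega)
      (fun q hqm => lt_trans (hq q hqm) (by omega))

theorem inner_wrap (gt : List Int) (v : Int) (j : Int) (fuel : Nat) (lf : Int) (rec : List Int)
    (h : gt ≠ []) :
    alignInner gt v j (fuel + 1) (gt.length : Int) lf rec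
      = alignInner gt v j (fuel + 1) 0 lf (rec ++ [lf]) := by
  have hpos : 0 < gt.length := List.length_pos_iff.mpr h
  have hne : ¬ ((0 : Int) = (gt.length : Int)) := by omega
  simp [alignInner, hne]

theorem getD_mem_of_lt {ps : List Int} {k : Nat} (hk : k < ps.length) : ps.getD k 0 ∈ ps := by
  rw [List.getD_eq_getElem _ _ hk]; exact List.getElem_mem hk

theorem getD_le_getD {ps : List Int} (hps : ps.Pairwise (· < ·)) {a b : Nat}
    (hab : a ≤ b) (hb : b < ps.length) : ps.getD a 0 ≤ ps.getD b 0 := by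
  rcases Nat.eq_or_lt_of_le hab with rfl | hlt
  · exact le_refl _
  · rw [List.getD_eq_getElem _ _ (by omega), List.getD_eq_getElem _ _ hb]
    exact le_of_lt (List.pairwise_iff_getElem.mp hps a b (by omega) hb hlt)

theorem step_eq (gt : List Int) (jv : Int × Int) (st : Int × Int × List Int)
    (h0 : 0 ≤ st.2.1) (h1 : st.2.1 ≤ (gt.length : Int)) :
    (if jv.2 ∈ gt then alignInner gt jv.2 jv.1 (2 * gt.length + 2) st.2.1 st.1 st.2.2 else st)
      = (match (buildPos gt).get? jv.2 with
         | none => st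
         | some ps =>
           let lo := bisectLoop ps st.2.1 0 ps.length
           if lo = ps.length then
             (jv.1, PySem.List.pyGetD ps 0 0 + 1, st.2.2 ++ [st.1])
           else
             (jv.1, PySem.List.pyGetD ps (lo : Int) 0 + 1, st.2.2)) := by
  obtain ⟨lf, i, rec⟩ := st
  obtain ⟨j, v⟩ := jv
  simp only at h0 h1 ⊢
  by_cases hv : v ∈ gt
  · rw [if_pos hv]
    have hocc : occ gt v ≠ [] := occ_ne_nil hv
    rw [buildPos_get? gt v, if_neg hocc]
    set ps := occ gt v with hps_def
    have hps : ps.Pairwise (· < ·) := occ_pairwise gt v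
    obtain ⟨hlo0, hlole, hbelow, habove⟩ :=
      bisect_inv ps i hps ps.length 0 ps.length (by omega) (by omega) (le_refl _)
        (by omega) (by omega)
    set lo := bisectLoop ps i 0 ps.length with hlo_def
    have hmemidx : ∀ q ∈ ps, ∃ k, ∃ _ : k < ps.length, ps.getD k 0 = q := by
      intro q hq
      obtain ⟨k, hk, hkq⟩ := List.mem_iff_getElem.mp hq
      exact ⟨k, hk, by rw [List.getD_eq_getElem _ _ hk]; exact hkq⟩
    by_cases hr : lo = ps.length
    · -- no occurrence ≥ i: wrap
      have hall : ∀ q ∈ ps, q < i := by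
        intro q hq
        obtain ⟨k, hk, rfl⟩ := hmemidx q hq
        exact hbelow k (by omega)
      have hpsne : 0 < ps.length := List.length_pos_iff.mpr hocc
      have hgtne : gt ≠ [] := by rintro rfl; simp at hv
      set c := ((gt.length : Int) - i).toNat with hc_def
      have hcle : c ≤ gt.length := by omega
      have hfe : 2 * gt.length + 2 = (2 * gt.length + 1 - c + 1) + c := by omega
      rw [hfe, inner_scan gt v j c i lf rec _ h0 (by omega) hall,
        inner_wrap gt v j _ lf rec hgtne]
      have hp0 : ps.getD 0 0 ∈ ps := getD_mem_of_lt hpsne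
      rw [inner_found gt v j _ 0 (ps.getD 0 0) lf (rec ++ [lf]) (le_refl _)
        (occ_nonneg hp0) hp0
        (by
          intro q hq _
          obtain ⟨k, hk, rfl⟩ := hmemidx q hq
          exact getD_le_getD hps (Nat.zero_le k) hk)
        (by have := occ_lt hp0; omega)]
      simp only [← hlo_def, if_pos hr, PySem.List.pyGetD_zero]
    · -- found at ps[lo]
      have hlolt : lo < ps.length := by omega
      have hp : ps.getD lo 0 ∈ ps := getD_mem_of_lt hlolt
      rw [inner_found gt v j _ i (ps.getD lo 0) lf rec h0 (habove lo (le_refl _) hlolt) hp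
        (by
          intro q hq hiq
          obtain ⟨k, hk, rfl⟩ := hmemidx q hq
          have : ¬ k < lo := fun hklt => absurd (hbelow k hklt) (by omega)
          exact getD_le_getD hps (by omega) hk)
        (by have := occ_lt hp; have := occ_nonneg hp; omega)]
      simp only [← hlo_def, if_neg hr, PySem.List.pyGetD_natCast]
  · rw [if_neg hv, buildPos_get? gt v, if_pos (occ_nil hv)]

theorem step_inv (gt : List Int) (jv : Int × Int) (st : Int × Int × List Int)
    (h0 : 0 ≤ st.2.1) (h1 : st.2.1 ≤ (gt.length : Int)) :
    0 ≤ (if jv.2 ∈ gt then alignInner gt jv.2 jv.1 (2 * gt.length + 2) st.2.1 st.1 st.2.2 else st).2.1 ∧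
    (if jv.2 ∈ gt then alignInner gt jv.2 jv.1 (2 * gt.length + 2) st.2.1 st.1 st.2.2 else st).2.1 ≤ (gt.length : Int) := by
  rw [step_eq gt jv st h0 h1]
  rcases hq : (buildPos gt).get? jv.2 with _ | ps
  · exact ⟨h0, h1⟩
  · rw [buildPos_get? gt jv.2] at hq
    split at hq
    · exact absurd hq (by simp)
    · have hps : ps = occ gt jv.2 := by injection hq with h; exact h.symm
      subst hps
      rename_i hocc
      have hpsne : 0 < (occ gt jv.2).length := List.length_pos_iff.mpr hocc
      simp only []
      split_ifs with hr
      · have hm : (occ gt jv.2).getD 0 0 ∈ occ gt jv.2 := getD_mem_of_lt hpsne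
        have := occ_nonneg hm; have := occ_lt hm
        rw [PySem.List.pyGetD_zero]
        constructor <;> simp only [] <;> omega
      · have hlolt : bisectLoop (occ gt jv.2) st.2.1 0 (occ gt jv.2).length < (occ gt jv.2).length := by
          have := (bisect_inv (occ gt jv.2) st.2.1 (occ_pairwise gt jv.2) (occ gt jv.2).length 0
            (occ gt jv.2).length (by omega) (by omega) (le_refl _) (by omega) (by omega)).2.1
          omega
        have hm := getD_mem_of_lt hlolt (ps := occ gt jv.2)
        have := occ_nonneg hm; have := occ_lt hm
        rw [PySem.List.pyGetD_natCast]
        constructor <;> simp only [] <;> omega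

theorem foldl_eq (gt : List Int) :
    ∀ (l : List (Int × Int)) (st : Int × Int × List Int),
      0 ≤ st.2.1 → st.2.1 ≤ (gt.length : Int) →
      l.foldl (fun st jv =>
        if jv.2 ∈ gt then alignInner gt jv.2 jv.1 (2 * gt.length + 2) st.2.1 st.1 st.2.2 else st) st
      = l.foldl (fun st jv =>
          match (buildPos gt).get? jv.2 with
          | none => st
          | some ps =>
            let lo := bisectLoop ps st.2.1 0 ps.length
            if lo = ps.length then
              (jv.1, PySem.List.pyGetD ps 0 0 + 1, st.2.2 ++ [st.1])
            else
              (jv.1, PySem.List.pyGetD ps (lo : Int) 0 + 1, st.2.2)) st := by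
  intro l
  induction l with
  | nil => intro st _ _; rfl
  | cons jv t ih =>
    intro st h0 h1
    simp only [List.foldl_cons]
    rw [← step_eq gt jv st h0 h1]
    exact ih _ (step_inv gt jv st h0 h1).1 (step_inv gt jv st h0 h1).2

-- ===== VERDICT (by name: the statement is the Claim_ definition above) =====
theorem align_separate_spec : Claim_equal_align_separate := by
  intro arr gt _
  unfold Spec_align_separate align_separate align_separate_alt
  rw [foldl_eq gt (PySem.List.enumerate arr) (-1, 0, ([] : List Int)) (by norm_num) (by positivity)]
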